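-- pv_equiv track=rewrite | github.com/Aasthaengg/IBMdataset | Python_codes/p03018/s362391289.py | solve
-- ===== SOURCE A (Python) =====
-- def solve(s):
--     n = len(s)
--     res = 0
--     i = 0
--     num = 0
--     while i < n-1:
--         if s[i] == "A":
--             num += 1
--             i += 1
--         elif s[i:i+2] == "BC":
--             res += num
--             i += 2
--         else:
--             num = 0
--             i += 1
--     return res
-- ===== SOURCE B (Python) =====
-- def solve(s):
--     # Staged pair-counting: every "BC" substring occurrence is a token (B != C,
--     # so occurrences never overlap or get consumed by a neighbour).  A "blocker"
--     # is any char that is neither 'A' nor part of a "BC" pair.  The answer is,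
--     # for each "BC" start b, the number of 'A's after the last blocker before b,
--     # read off from a prefix-count array.
--     n = len(s)
--     bc = [i for i in range(n - 1) if s[i] == 'B' and s[i + 1] == 'C']
--     bcset = set(bc)
--     prefA = [0]
--     for ch in s:
--         prefA.append(prefA[-1] + (ch == 'A'))
--     start = []          # start[i] = index just after the last blocker <= i (0 if none)
--     cur = 0
--     for i in range(n):
--         if not (s[i] == 'A' or i in bcset or (i >= 1 and i - 1 in bcset)):
--             cur = i + 1
--         start.append(cur)
--     return sum(prefA[b] - prefA[start[b]] for b in bc)
-- ===== Notes on version B (the rewrite author's own statement) =====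
-- stated objective: alternative
-- what changed: Replaces A's single-pass while-loop state machine by a staged pipeline: list all 'BC' pair positions (every 'BC' substring is a token since B≠C), build a prefix-count array of 'A's and a segment-start array (index after the last blocking char), then sum prefix-count differences over the BC positions.
import Mathlib
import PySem

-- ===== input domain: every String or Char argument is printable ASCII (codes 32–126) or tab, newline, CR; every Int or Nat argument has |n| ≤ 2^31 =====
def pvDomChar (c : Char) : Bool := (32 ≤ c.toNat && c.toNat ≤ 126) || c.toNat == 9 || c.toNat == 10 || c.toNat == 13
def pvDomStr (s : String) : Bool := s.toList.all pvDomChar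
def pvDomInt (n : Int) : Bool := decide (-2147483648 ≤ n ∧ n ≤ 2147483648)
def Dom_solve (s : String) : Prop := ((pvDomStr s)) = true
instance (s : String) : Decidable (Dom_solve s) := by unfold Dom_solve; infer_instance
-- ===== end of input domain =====

-- B replaces A's one-pass state machine by a staged pair-counting pipeline: it first
-- lists all "BC" pair positions, builds a prefix-count array of 'A's and a "segment
-- start" array (index after the last blocking char), then sums prefix differences;
-- objective: alternative (same O(n) cost, different algorithm).

-- ===== PORT A =====
-- A's while loop runs while i < n-1, i.e. while at least two characters remain;
-- we recurse on the remaining suffix of the string with the same state (num, res).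
def solveLoopA : List Char → Int → Int → Int
  | [], _, res => res
  | [_], _, res => res
  | c1 :: c2 :: rest, num, res =>
    if c1 = 'A' then solveLoopA (c2 :: rest) (num + 1) res
    else if c1 = 'B' ∧ c2 = 'C' then solveLoopA rest num (res + num)
    else solveLoopA (c2 :: rest) 0 res

def solve (s : String) : Int := solveLoopA s.toList 0 0

-- ===== PORT B =====
-- the filter predicate of Source B's first comprehension: s[i] == 'B' and s[i+1] == 'C';
-- indices produced by range(n-1) are in range, so getD with a dummy default is exact
def pvBcB (cs : List Char) (i : Nat) : Bool :=
  cs.getD i ' ' == 'B' && cs.getD (i + 1) ' ' == 'C'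

-- bc = [i for i in range(n-1) if s[i] == 'B' and s[i+1] == 'C']
def pvBcIdx (cs : List Char) : List Nat :=
  (List.range (cs.length - 1)).filter (pvBcB cs)

-- Source B's blocker test: not (s[i] == 'A' or i in bcset or (i >= 1 and i-1 in bcset))
def pvBlock (cs : List Char) (bcs : PySem.Set Nat) (i : Nat) : Bool :=
  !(cs.getD i ' ' == 'A' || bcs.contains i || (decide (1 ≤ i) && bcs.contains (i - 1)))

-- prefA = [0]; for ch in s: prefA.append(prefA[-1] + (ch == 'A'))
def pvPrefA (cs : List Char) : List Int :=
  cs.foldl (fun p ch => p ++ [p.getLastD 0 + (if ch == 'A' then 1 else 0)]) [0]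

-- start = []; cur = 0; for i in range(n): if blocker: cur = i+1; start.append(cur)
def pvStart (cs : List Char) (bcs : PySem.Set Nat) : List Nat :=
  ((List.range cs.length).foldl
    (fun (st : Nat × List Nat) i =>
      let cur := if pvBlock cs bcs i then i + 1 else st.1
      (cur, st.2 ++ [cur]))
    (0, [])).2

def solve_alt (s : String) : Int :=
  let cs := s.toList
  let bc := pvBcIdx cs
  let bcs := PySem.Set.ofList bc
  let prefA := pvPrefA cs
  let start := pvStart cs bcs
  (bc.map (fun b => prefA.getD b 0 - prefA.getD (start.getD b 0) 0)).sum

-- ===== PRECONDITION & SPEC =====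
def Spec_solve (s : String) (out : Int) : Prop := out = solve_alt s
instance (s : String) (out : Int) : Decidable (Spec_solve s out) := by unfold Spec_solve; infer_instance

-- ===== CLAIM (what is proved, stated in full; the proofs are below) =====
def Claim_equal_solve : Prop := ∀ (s : String), Dom_solve s → Spec_solve s (solve s)

-- ===== LEMMAS AND PROOFS =====

-- number of 'A' among the first i characters (the spec of Source B's prefA array)
def pvCA (cs : List Char) (i : Nat) : Int := ((cs.take i).countP (fun c => c == 'A') : Int)

-- the spec of Source B's start array: index just after the last blocker ≤ i
def pvStF (cs : List Char) : Nat → Nat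
  | 0 => if pvBlock cs (PySem.Set.ofList (pvBcIdx cs)) 0 then 1 else 0
  | (k+1) => if pvBlock cs (PySem.Set.ofList (pvBcIdx cs)) (k+1) then k + 2 else pvStF cs k

-- value contributed by a BC start b, as seen from loop position i with counter num
def pvV (cs : List Char) (i : Nat) (num : Int) (b : Nat) : Int :=
  if pvStF cs b ≤ i then num + (pvCA cs b - pvCA cs i) else pvCA cs b - pvCA cs (pvStF cs b)

-- total contribution of positions ≥ i
def pvS (cs : List Char) (i : Nat) (num : Int) : Int :=
  ((List.range' i (cs.length - i)).map (fun b => if pvBcB cs b then pvV cs i num b else 0)).sum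

theorem pvBcIdx_nodup (cs : List Char) : (pvBcIdx cs).Nodup :=
  (List.nodup_range).filter _

theorem pvSet_eq (cs : List Char) : PySem.Set.ofList (pvBcIdx cs) = pvBcIdx cs :=
  PySem.Set.ofList_eq_self_of_nodup _ (pvBcIdx_nodup cs)

theorem pvBcB_lt {cs : List Char} {i : Nat} (h : pvBcB cs i = true) : i + 1 < cs.length := by
  by_contra hn
  have : cs[i+1]? = none := List.getElem?_eq_none (by omega)
  simp [pvBcB, List.getD, this] at h

theorem pvMem_bcIdx (cs : List Char) (i : Nat) : i ∈ pvBcIdx cs ↔ pvBcB cs i = true := by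
  simp only [pvBcIdx, List.mem_filter, List.mem_range]
  constructor
  · rintro ⟨_, h⟩; exact h
  · intro h; exact ⟨by have := pvBcB_lt h; omega, h⟩

theorem pvContains_bcIdx (cs : List Char) (j : Nat) :
    PySem.Set.contains (pvBcIdx cs) j = pvBcB cs j := by
  by_cases h : j ∈ pvBcIdx cs
  · have h2 := (pvMem_bcIdx cs j).mp h
    rw [h2, (PySem.Set.contains_iff _ _).mpr h]
  · have h2 : pvBcB cs j = false := by
      cases hb : pvBcB cs j
      · rfl
      · exact absurd ((pvMem_bcIdx cs j).mpr hb) h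
    rw [h2]
    cases hc : PySem.Set.contains (pvBcIdx cs) j
    · rfl
    · exact absurd ((PySem.Set.contains_iff _ _).mp (by rw [hc])) h

-- pvBlock with the real bc set, rewritten through pvBcB
theorem pvBlock_eq (cs : List Char) (i : Nat) :
    pvBlock cs (PySem.Set.ofList (pvBcIdx cs)) i =
      (!(cs.getD i ' ' == 'A') && !(pvBcB cs i) && (decide (i = 0) || !(pvBcB cs (i - 1)))) := by
  rw [pvSet_eq]
  simp only [pvBlock, pvContains_bcIdx]
  cases hA : (cs.getD i ' ' == 'A') <;> cases hb : pvBcB cs i <;>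
    cases hp : pvBcB cs (i-1) <;> cases i <;> simp_all

theorem pvStF_le (cs : List Char) (b : Nat) : pvStF cs b ≤ b + 1 := by
  induction b with
  | zero => simp [pvStF]; split <;> omega
  | succ k ih => simp [pvStF]; split <;> omega

theorem pvStF_le_of_not_block {cs : List Char} {b : Nat}
    (h : pvBlock cs (PySem.Set.ofList (pvBcIdx cs)) b = false) : pvStF cs b ≤ b := by
  cases b with
  | zero => simp [pvStF, h]
  | succ k => simp [pvStF, h]; exact pvStF_le cs k

theorem pvBlock_of_stF {cs : List Char} {b i : Nat} (h : pvStF cs b = i + 1) :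
    pvBlock cs (PySem.Set.ofList (pvBcIdx cs)) i = true := by
  induction b with
  | zero =>
    cases hb : pvBlock cs (PySem.Set.ofList (pvBcIdx cs)) 0
    · simp [pvStF, hb] at h
    · simp [pvStF, hb] at h
      have hi : i = 0 := by omega
      subst hi; exact hb
  | succ k ih =>
    cases hb : pvBlock cs (PySem.Set.ofList (pvBcIdx cs)) (k+1)
    · simp only [pvStF, hb, Bool.false_eq_true, if_false] at h
      exact ih h
    · simp [pvStF, hb] at h
      have hi : i = k + 1 := by omega
      subst hi; exact hb

theorem pvStF_ge {cs : List Char} {j b : Nat}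
    (hj : pvBlock cs (PySem.Set.ofList (pvBcIdx cs)) j = true) (hle : j ≤ b) :
    j + 1 ≤ pvStF cs b := by
  induction b with
  | zero =>
    have : j = 0 := by omega
    subst this; simp [pvStF, hj]
  | succ k ih =>
    by_cases hjk : j = k + 1
    · subst hjk; simp [pvStF, hj]
    · have : j ≤ k := by omega
      by_cases hb : pvBlock cs (PySem.Set.ofList (pvBcIdx cs)) (k+1) = true
      · simp [pvStF, hb]; omega
      · simp [pvStF, Bool.eq_false_iff.mpr hb]
        exact ih this

theorem pvCA_zero (cs : List Char) : pvCA cs 0 = 0 := by simp [pvCA]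

theorem pvCA_succ (cs : List Char) {i : Nat} (h : i < cs.length) :
    pvCA cs (i + 1) = pvCA cs i + (if cs.getD i ' ' == 'A' then 1 else 0) := by
  have h1 : cs.take (i+1) = cs.take i ++ [cs[i]] := by
    rw [List.take_add_one, List.getElem?_eq_getElem h]; rfl
  have h2 : cs.getD i ' ' = cs[i] := List.getD_eq_getElem cs ' ' h
  rw [pvCA, pvCA, h1, List.countP_append, h2]
  cases hc : (cs[i] == 'A') <;> simp [hc]

-- ===== loop-step lemmas for the A-side characterisation =====

theorem pvS_zero {cs : List Char} {i : Nat} (h : cs.length ≤ i + 1) (num : Int) :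
    pvS cs i num = 0 := by
  unfold pvS
  by_cases h0 : cs.length ≤ i
  · have h1 : cs.length - i = 0 := by omega
    simp [h1]
  · have h1 : cs.length - i = 1 := by omega
    rw [h1]
    cases hb : pvBcB cs i
    · simp [List.range', hb]
    · exact absurd (pvBcB_lt hb) (by omega)

theorem pvS_step {cs : List Char} {i : Nat} (h : i < cs.length) (num : Int) :
    pvS cs i num = (if pvBcB cs i then pvV cs i num i else 0) +
      ((List.range' (i+1) (cs.length - (i+1))).map
        (fun b => if pvBcB cs b then pvV cs i num b else 0)).sum := by
  unfold pvS
  have h1 : cs.length - i = (cs.length - (i+1)) + 1 := by omega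
  rw [h1, List.range'_succ]
  simp

theorem pvV_stepA {cs : List Char} {i : Nat} (hi : i < cs.length)
    (hA : cs.getD i ' ' = 'A') (num : Int) {b : Nat} :
    pvV cs i num b = pvV cs (i+1) (num+1) b := by
  have hA' : cs[i]?.getD ' ' = 'A' := hA
  have hblock : pvBlock cs (PySem.Set.ofList (pvBcIdx cs)) i = false := by
    rw [pvBlock_eq]; simp [hA']
  have hca : pvCA cs (i+1) = pvCA cs i + 1 := by rw [pvCA_succ cs hi]; simp [hA']
  unfold pvV
  by_cases h1 : pvStF cs b ≤ i
  · rw [if_pos h1, if_pos (by omega)]; omega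
  · have h2 : ¬ pvStF cs b ≤ i + 1 := by
      intro hle
      have he : pvStF cs b = i + 1 := by omega
      have := pvBlock_of_stF he
      simp [hblock] at this
    rw [if_neg h1, if_neg h2]

theorem pvV_stepBC {cs : List Char} {i : Nat} (hi1 : i + 1 < cs.length)
    (hbc : pvBcB cs i = true) (num : Int) {b : Nat} :
    pvV cs i num b = pvV cs (i+2) num b := by
  have hB : cs[i]?.getD ' ' = 'B' := by
    have := hbc; simp [pvBcB] at this; exact this.1
  have hC : cs[i+1]?.getD ' ' = 'C' := by
    have := hbc; simp [pvBcB] at this; exact this.2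
  have hb1 : pvBcB cs (i+1) = false := by
    cases h : pvBcB cs (i+1)
    · rfl
    · simp [pvBcB, hC] at h
  have hblock : pvBlock cs (PySem.Set.ofList (pvBcIdx cs)) i = false := by
    rw [pvBlock_eq]; simp [hbc]
  have hblock1 : pvBlock cs (PySem.Set.ofList (pvBcIdx cs)) (i+1) = false := by
    rw [pvBlock_eq]; simp [hbc]
  have hca1 : pvCA cs (i+1) = pvCA cs i := by rw [pvCA_succ cs (by omega)]; simp [hB]
  have hca2 : pvCA cs (i+2) = pvCA cs i := by
    rw [show i + 2 = (i+1) + 1 from rfl, pvCA_succ cs hi1]; simp [hC, hca1]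
  unfold pvV
  by_cases h1 : pvStF cs b ≤ i
  · rw [if_pos h1, if_pos (by omega), hca2]
  · have h2 : ¬ pvStF cs b ≤ i + 2 := by
      intro hle
      rcases (by omega : pvStF cs b = i + 1 ∨ pvStF cs b = i + 2) with he | he
      · have := pvBlock_of_stF he
        simp [hblock] at this
      · have := pvBlock_of_stF (show pvStF cs b = (i+1) + 1 by omega)
        simp [hblock1] at this
    rw [if_neg h1, if_neg h2]

theorem pvV_stepBlock {cs : List Char} {i : Nat}
    (hblock : pvBlock cs (PySem.Set.ofList (pvBcIdx cs)) i = true) (num : Int) {b : Nat}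
    (hb : i + 1 ≤ b) :
    pvV cs i num b = pvV cs (i+1) 0 b := by
  have hge : i + 1 ≤ pvStF cs b := pvStF_ge hblock (by omega)
  unfold pvV
  rw [if_neg (by omega)]
  by_cases h1 : pvStF cs b ≤ i + 1
  · have he : pvStF cs b = i + 1 := by omega
    rw [if_pos h1, he]; ring
  · rw [if_neg h1]

-- ===== the A-side characterisation =====
theorem pvMainA (cs : List Char) : ∀ k i num res, cs.length - i ≤ k →
    (i = 0 ∨ pvBcB cs (i - 1) = false) →
    solveLoopA (cs.drop i) num res = res + pvS cs i num := by
  intro k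
  induction k with
  | zero =>
    intro i num res hk _
    have hdrop : cs.drop i = [] := List.drop_eq_nil_iff.mpr (by omega)
    rw [hdrop, pvS_zero (by omega)]
    simp [solveLoopA]
  | succ k ih =>
    intro i num res hk hP
    by_cases hterm : cs.length ≤ i + 1
    · rw [pvS_zero hterm]
      have hlen : (cs.drop i).length ≤ 1 := by simp; omega
      cases hd : cs.drop i with
      | nil => simp [solveLoopA]
      | cons a t =>
        cases t with
        | nil => simp [solveLoopA]
        | cons a2 t2 => rw [hd] at hlen; simp at hlen
    · push_neg at hterm
      have hi : i < cs.length := by omega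
      have hgd : cs[i]?.getD ' ' = cs[i] := List.getD_eq_getElem cs ' ' hi
      have hgd1 : cs[i+1]?.getD ' ' = cs[i+1] := List.getD_eq_getElem cs ' ' hterm
      have hdrop : cs.drop i = cs[i] :: cs[i+1] :: cs.drop (i+2) := by
        rw [← List.getElem_cons_drop hi, ← List.getElem_cons_drop hterm]
      rw [hdrop]
      by_cases hA : cs[i] = 'A'
      · -- branch 1 of A's loop
        have hbcb : pvBcB cs i = false := by simp [pvBcB, hgd, hA]
        have hrec : solveLoopA (cs[i] :: cs[i+1] :: cs.drop (i+2)) num res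
            = solveLoopA (cs.drop (i+1)) (num+1) res := by
          have : cs.drop (i+1) = cs[i+1] :: cs.drop (i+2) := by
            rw [← List.getElem_cons_drop hterm]
          rw [this, solveLoopA, if_pos hA]
        rw [hrec, ih (i+1) (num+1) res (by omega) (Or.inr hbcb)]
        congr 1
        rw [pvS_step hi, hbcb, if_neg (by simp)]
        unfold pvS
        simp only [zero_add]
        apply congrArg List.sum
        apply List.map_congr_left
        intro b _
        rw [pvV_stepA hi (show cs.getD i ' ' = 'A' by rw [List.getD_eq_getElem cs ' ' hi, hA])]
      · by_cases hBC : cs[i] = 'B' ∧ cs[i+1] = 'C'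
        · -- branch 2 of A's loop
          have hbcb : pvBcB cs i = true := by simp [pvBcB, hgd, hgd1, hBC.1, hBC.2]
          have hbcb1 : pvBcB cs (i+1) = false := by
            cases h : pvBcB cs (i+1)
            · rfl
            · simp [pvBcB, hgd1, hBC.2] at h
          have hrec : solveLoopA (cs[i] :: cs[i+1] :: cs.drop (i+2)) num res
              = solveLoopA (cs.drop (i+2)) num (res + num) := by
            rw [solveLoopA, if_neg hA, if_pos hBC]
          rw [hrec, ih (i+2) num (res+num) (by omega) (Or.inr (by simpa using hbcb1))]
          have hVi : pvV cs i num i = num := by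
            have hbl : pvBlock cs (PySem.Set.ofList (pvBcIdx cs)) i = false := by
              rw [pvBlock_eq]; simp [hbcb]
            have := pvStF_le_of_not_block hbl
            unfold pvV
            rw [if_pos this]; ring
          rw [pvS_step hi, hbcb, if_pos rfl, hVi]
          by_cases hi2 : cs.length ≤ i + 2
          · rw [pvS_zero (by omega)]
            have h0 : cs.length - (i+1) = 1 := by omega
            rw [h0]
            simp [List.range', hbcb1]
          · have h1 : cs.length - (i+1) = (cs.length - (i+2)) + 1 := by omega
            rw [h1, List.range'_succ, List.map_cons, List.sum_cons, hbcb1, if_neg (by simp)]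
            have h2 : ((List.range' (i+2) (cs.length - (i+2))).map
                (fun b => if pvBcB cs b then pvV cs i num b else 0)).sum = pvS cs (i+2) num := by
              unfold pvS
              apply congrArg List.sum
              apply List.map_congr_left
              intro b _
              rw [pvV_stepBC hterm hbcb]
            rw [h2]
            ring
        · -- branch 3 of A's loop
          have hbcb : pvBcB cs i = false := by
            cases h : pvBcB cs i
            · rfl
            · simp [pvBcB, hgd, hgd1] at h
              exact absurd h hBC
          have hbl : pvBlock cs (PySem.Set.ofList (pvBcIdx cs)) i = true := by
            rw [pvBlock_eq]
            rcases hP with h0 | h0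
            · subst h0; simp [hgd, hA, hbcb]
            · simp [hgd, hA, hbcb, h0]
          have hrec : solveLoopA (cs[i] :: cs[i+1] :: cs.drop (i+2)) num res
              = solveLoopA (cs.drop (i+1)) 0 res := by
            have : cs.drop (i+1) = cs[i+1] :: cs.drop (i+2) := by
              rw [← List.getElem_cons_drop hterm]
            rw [this, solveLoopA, if_neg hA, if_neg hBC]
          rw [hrec, ih (i+1) 0 res (by omega) (Or.inr (by simpa using hbcb))]
          congr 1
          rw [pvS_step hi, hbcb, if_neg (by simp)]
          unfold pvS
          simp only [zero_add]
          apply congrArg List.sum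
          apply List.map_congr_left
          intro b hb
          have hble : i + 1 ≤ b := ((List.mem_range'_1).mp hb).1
          rw [pvV_stepBlock hbl num hble]

-- ===== the B-side characterisation =====
theorem pvPrefA_eq (cs : List Char) :
    pvPrefA cs = (List.range (cs.length + 1)).map (fun k => pvCA cs k) := by
  induction cs using List.reverseRecOn with
  | nil => simp [pvPrefA, pvCA]
  | append_singleton cs c ih =>
    have hstep : pvPrefA (cs ++ [c]) =
        pvPrefA cs ++ [(pvPrefA cs).getLastD 0 + (if c == 'A' then 1 else 0)] := by
      unfold pvPrefA
      rw [List.foldl_append]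
      rfl
    rw [hstep, ih]
    have hlast : ((List.range (cs.length + 1)).map (fun k => pvCA cs k)).getLastD 0
        = pvCA cs cs.length := by
      rw [List.range_succ, List.map_append]
      exact List.getLastD_concat
    rw [hlast]
    have hlen : (cs ++ [c]).length = cs.length + 1 := by simp
    rw [hlen, List.range_succ (n := cs.length + 1), List.map_append]
    congr 1
    · apply List.map_congr_left
      intro k hk
      have hk' : k < cs.length + 1 := List.mem_range.mp hk
      unfold pvCA
      rw [List.take_append_of_le_length (by omega)]
    · simp only [List.map_cons, List.map_nil]
      congr 1
      unfold pvCA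
      have h1 : (cs ++ [c]).take (cs.length + 1) = cs ++ [c] := by
        rw [show cs.length + 1 = (cs ++ [c]).length by simp, List.take_length]
      have h2 : cs.take cs.length = cs := List.take_length
      rw [h1, h2, List.countP_append]
      cases hc : (c == 'A') <;> simp [hc]

theorem pvStartAux (cs : List Char) (k : Nat) :
    (List.range k).foldl
      (fun (st : Nat × List Nat) i =>
        let cur := if pvBlock cs (PySem.Set.ofList (pvBcIdx cs)) i then i + 1 else st.1
        (cur, st.2 ++ [cur]))
      (0, [])
    = ((if k = 0 then 0 else pvStF cs (k-1)), (List.range k).map (pvStF cs)) := by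
  induction k with
  | zero => simp
  | succ k ih =>
    rw [List.range_succ, List.foldl_append, ih, List.foldl_cons, List.foldl_nil]
    cases k with
    | zero =>
      cases hb : pvBlock cs (PySem.Set.ofList (pvBcIdx cs)) 0 <;>
        simp [pvStF, hb]
    | succ j =>
      cases hb : pvBlock cs (PySem.Set.ofList (pvBcIdx cs)) (j+1) <;>
        simp [pvStF, hb, List.range_succ]

theorem pvStart_eq (cs : List Char) :
    pvStart cs (PySem.Set.ofList (pvBcIdx cs)) = (List.range cs.length).map (pvStF cs) := by
  unfold pvStart
  rw [pvStartAux]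

theorem pvAlt_eq (s : String) :
    solve_alt s = ((pvBcIdx s.toList).map
      (fun b => pvCA s.toList b - pvCA s.toList (pvStF s.toList b))).sum := by
  unfold solve_alt
  simp only [pvPrefA_eq, pvStart_eq]
  apply congrArg List.sum
  apply List.map_congr_left
  intro b hb
  have hblt : b + 1 < s.toList.length := pvBcB_lt ((pvMem_bcIdx _ _).mp hb)
  have h1 : ((List.range (s.toList.length + 1)).map (fun k => pvCA s.toList k)).getD b 0
      = pvCA s.toList b := PySem.List.getD_map_range _ _ _ _ (by omega)
  have h2 : ((List.range s.toList.length).map (pvStF s.toList)).getD b 0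
      = pvStF s.toList b := PySem.List.getD_map_range _ _ _ _ (by omega)
  have h3 : ((List.range (s.toList.length + 1)).map (fun k => pvCA s.toList k)).getD
      (pvStF s.toList b) 0 = pvCA s.toList (pvStF s.toList b) :=
    PySem.List.getD_map_range _ _ _ _ (by have := pvStF_le s.toList b; omega)
  rw [h1, h2, h3]

theorem pvSum_filter (l : List Nat) (p : Nat → Bool) (f : Nat → Int) :
    ((l.filter p).map f).sum = (l.map fun b => if p b then f b else 0).sum := by
  induction l with
  | nil => rfl
  | cons a t ih => by_cases h : p a <;> simp [h, ih]

theorem pvBridge (cs : List Char) :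
    pvS cs 0 0 = ((pvBcIdx cs).map (fun b => pvCA cs b - pvCA cs (pvStF cs b))).sum := by
  unfold pvS
  rw [Nat.sub_zero, ← List.range_eq_range']
  have hpt : (List.range cs.length).map
      (fun b => if pvBcB cs b then pvV cs 0 0 b else 0) =
      (List.range cs.length).map
      (fun b => if pvBcB cs b then pvCA cs b - pvCA cs (pvStF cs b) else 0) := by
    apply List.map_congr_left
    intro b _
    by_cases hb : pvBcB cs b = true
    · rw [hb, if_pos rfl, if_pos rfl]
      unfold pvV
      by_cases h1 : pvStF cs b ≤ 0
      · have h0 : pvStF cs b = 0 := by omega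
        rw [if_pos h1, h0, pvCA_zero]
        ring
      · rw [if_neg h1]
    · simp [hb]
  rw [hpt, ← pvSum_filter]
  have hfil : (List.range cs.length).filter (pvBcB cs) = pvBcIdx cs := by
    unfold pvBcIdx
    cases hn : cs.length with
    | zero => simp
    | succ m =>
      have : m + 1 - 1 = m := by omega
      rw [this, List.range_succ, List.filter_append]
      have hlast : pvBcB cs m = false := by
        cases h : pvBcB cs m
        · rfl
        · have := pvBcB_lt h; omega
      simp [hlast]
  rw [hfil]

-- ===== VERDICT (by name: the statement is the Claim_ definition above) =====
theorem solve_spec : Claim_equal_solve := by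
  intro s _
  unfold Spec_solve solve
  rw [pvAlt_eq, ← pvBridge]
  have := pvMainA s.toList s.toList.length 0 0 0 (by omega) (Or.inl rfl)
  simpa using this
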